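-- pv_equiv track=rewrite | github.com/olaw4le/Dublin-bus | web_app/data_analytics/to_time_group.py | to_time_group
-- ===== SOURCE A (Python) =====
-- def to_time_group(time):
--     """assign a 'time_group' to the passed time"""
--
--     # if time is greater than 24:00; assign to group 0
--     if (time <= 0) or (time >= 86400):
--         return 0
--
--     # between 00:00 - 07:30 (24hr); time groups are by hour
--     if time <= 27000:
--         return (time - 1) // 3600
--
--     # between 07:30 - 09:00 (24hr); time groups are by half-hour
--     elif time <= 32400:
--         return (to_time_group(27000)) + ((time - 27000) // 1800)
--
--     # between 09:00 - 16:50 (24hr); time groups are by hour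
--     elif time <= 59400:
--         return (to_time_group(32400)) + ((time - 32400) // 3600)
--
--     # between 16:30 - 19:00 (24hr); time groups are by half-hour
--     elif time <= 68400:
--         return (to_time_group(59400)) + ((time - 59400) // 1800)
--
--     # between 19:00 - 24:00 (24hr); time groups are by hour
--     else:
--         return (to_time_group(68400)) + ((time - 68400) // 3600)
-- ===== SOURCE B (Python) =====
-- # Table-driven rewrite: the five segments as (upper_bound, reference_point, step, base_group)
-- # with precomputed cumulative base offsets, replacing A's recursive if/elif cascade.
-- _SEGMENTS = [
--     (27000, 1, 3600, 0),
--     (32400, 27000, 1800, 7),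
--     (59400, 32400, 3600, 10),
--     (68400, 59400, 1800, 17),
--     (86400, 68400, 3600, 22),
-- ]
--
-- def to_time_group(time):
--     if time <= 0 or time >= 86400:
--         return 0
--     for upper, ref, step, base in _SEGMENTS:
--         if time <= upper:
--             return base + (time - ref) // step
--     return 0
-- ===== Notes on version B (the rewrite author's own statement) =====
-- stated objective: simpler
-- what changed: Replaced the recursive if/elif cascade (which recomputes base offsets via recursive calls) by a single loop over an explicit breakpoint table (upper_bound, reference_point, step, base_group) with the cumulative offsets precomputed as data.
import Mathlib
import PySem

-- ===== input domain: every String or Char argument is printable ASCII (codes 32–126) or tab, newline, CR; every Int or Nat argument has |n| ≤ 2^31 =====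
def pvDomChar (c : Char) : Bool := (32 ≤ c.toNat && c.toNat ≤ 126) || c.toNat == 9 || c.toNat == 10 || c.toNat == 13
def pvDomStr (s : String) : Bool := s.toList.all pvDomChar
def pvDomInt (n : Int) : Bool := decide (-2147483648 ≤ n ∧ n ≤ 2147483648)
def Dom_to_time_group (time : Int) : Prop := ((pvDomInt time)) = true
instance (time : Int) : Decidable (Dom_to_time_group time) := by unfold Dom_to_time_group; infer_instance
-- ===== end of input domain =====

-- B replaces A's recursive if/elif cascade by a loop over an explicit breakpoint table
-- with precomputed cumulative base offsets (objective: simpler).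

-- ===== PORT A =====
-- literal transliteration of A's recursive cascade; the recursive calls are on the
-- segment boundaries 27000/32400/59400/68400, each strictly below the current time.
def to_time_group (time : Int) : Int :=
  if time ≤ 0 ∨ time ≥ 86400 then 0
  else if time ≤ 27000 then PySem.Int.floordiv (time - 1) 3600
  else if time ≤ 32400 then to_time_group 27000 + PySem.Int.floordiv (time - 27000) 1800
  else if time ≤ 59400 then to_time_group 32400 + PySem.Int.floordiv (time - 32400) 3600
  else if time ≤ 68400 then to_time_group 59400 + PySem.Int.floordiv (time - 59400) 1800
  else to_time_group 68400 + PySem.Int.floordiv (time - 68400) 3600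
termination_by time.toNat
decreasing_by all_goals omega

-- ===== PORT B =====
def tg_segments : List (Int × Int × Int × Int) :=
  [(27000, 1, 3600, 0), (32400, 27000, 1800, 7), (59400, 32400, 3600, 10),
   (68400, 59400, 1800, 17), (86400, 68400, 3600, 22)]

-- the 'for' loop over the table: first entry with time ≤ upper wins
def tg_lookup (time : Int) : List (Int × Int × Int × Int) → Int
  | [] => 0
  | (upper, ref, step, base) :: rest =>
      if time ≤ upper then base + PySem.Int.floordiv (time - ref) step
      else tg_lookup time rest

def to_time_group_alt (time : Int) : Int :=
  if time ≤ 0 ∨ time ≥ 86400 then 0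
  else tg_lookup time tg_segments

-- ===== PRECONDITION & SPEC =====
def Spec_to_time_group (time : Int) (out : Int) : Prop := out = to_time_group_alt time
instance (time : Int) (out : Int) : Decidable (Spec_to_time_group time out) := by unfold Spec_to_time_group; infer_instance

-- ===== CLAIM (what is proved, stated in full; the proofs are below) =====
def Claim_equal_to_time_group : Prop := ∀ (time : Int), Dom_to_time_group time → Spec_to_time_group time (to_time_group time)

-- ===== LEMMAS AND PROOFS =====
theorem tg_at_27000 : to_time_group 27000 = 7 := by
  rw [to_time_group]; decide
theorem tg_at_32400 : to_time_group 32400 = 10 := by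
  rw [to_time_group, tg_at_27000]; decide
theorem tg_at_59400 : to_time_group 59400 = 17 := by
  rw [to_time_group, tg_at_32400]; decide
theorem tg_at_68400 : to_time_group 68400 = 22 := by
  rw [to_time_group, tg_at_59400]; decide

-- ===== VERDICT (by name: the statement is the Claim_ definition above) =====
theorem to_time_group_spec : Claim_equal_to_time_group := by
  intro time _
  unfold Spec_to_time_group to_time_group_alt tg_segments
  unfold to_time_group
  rw [tg_at_27000, tg_at_32400, tg_at_59400, tg_at_68400]
  simp only [tg_lookup]
  split_ifs <;> first | rfl | omega
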